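-- pv_equiv track=rewrite | github.com/Kevinrobot34/atcoder | agc/agc041/c_boardgen.py | calc_quality
-- ===== SOURCE A (Python) =====
-- def calc_quality(board):
--     n = len(board)
--
--     def count_char(s):
--         char_set = set(s)
--         char_set -= set('.')
--         return len(char_set)
--
--     q = count_char([board[0][j] for j in range(n)])
--     for i in range(1, n):
--         q_i = count_char([board[i][j] for j in range(n)])
--         if q != q_i:
--             return -1
--     for i in range(n):
--         q_i = count_char([board[j][i] for j in range(n)])
--         if q != q_i:
--             return -1
--     return q
-- ===== SOURCE B (Python) =====
-- def _distinct(chars):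
--     # distinct non-'.' count via sort-then-scan instead of a hash set
--     total = 0
--     prev = None
--     for c in sorted(chars):
--         if c != '.' and c != prev:
--             total += 1
--         prev = c
--     return total
--
--
-- def calc_quality(board):
--     n = len(board)
--     if n == 0:
--         return 0
--     q = _distinct(board[0][j] for j in range(n))
--     ok = all(_distinct(board[i][j] for j in range(n)) == q and
--              _distinct(board[j][i] for j in range(n)) == q
--              for i in range(n))
--     return q if ok else -1
-- ===== Notes on version B (the rewrite author's own statement) =====
-- stated objective: alternative
-- what changed: B computes each distinct-non-'.' count by sorting the line and counting positions that differ from their predecessor (comparison-based scan instead of hash sets and set difference), and fuses A's two sequential early-exit loops into one all() pass over i that checks row i and column i together against row 0's count.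
-- outside the precondition, e.g. on calc_quality(['xb.01b', '. .', '']): A returns -1, B raises IndexError
import Mathlib
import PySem

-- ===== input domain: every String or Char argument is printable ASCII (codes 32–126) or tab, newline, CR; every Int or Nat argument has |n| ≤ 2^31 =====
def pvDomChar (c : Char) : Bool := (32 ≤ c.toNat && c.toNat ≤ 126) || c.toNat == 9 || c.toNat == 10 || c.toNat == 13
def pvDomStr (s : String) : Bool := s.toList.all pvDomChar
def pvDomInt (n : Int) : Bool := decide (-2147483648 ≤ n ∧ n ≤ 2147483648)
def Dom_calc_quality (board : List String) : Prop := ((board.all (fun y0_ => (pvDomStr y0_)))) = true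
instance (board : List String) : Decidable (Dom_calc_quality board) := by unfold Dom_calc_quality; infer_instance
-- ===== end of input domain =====

-- B counts distinct non-'.' chars by sorting each line and scanning for predecessor changes
-- (instead of hash sets with set difference) and fuses A's two early-exit loops into one
-- all() pass checking row i and column i together (objective: alternative, not faster).

-- ===== PORT A =====
-- count_char(s) = len(set(s) - set('.'))
def pvCountCharA (s : List Char) : Int :=
  PySem.Set.len (PySem.Set.diff (PySem.Set.ofList s) (PySem.Set.ofList ['.']))

-- [board[i][j] for j in range(n)]  (pyGetD is sound here: Pre_ gives rows of length ≥ n, and i is a loop index < n)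
def pvRowA (boardL : List (List Char)) (n : Int) (i : Int) : List Char :=
  (PySem.List.pyRange 0 n 1).map (fun j => PySem.List.pyGetD (PySem.List.pyGetD boardL i []) j ' ')

-- [board[j][i] for j in range(n)]
def pvColA (boardL : List (List Char)) (n : Int) (i : Int) : List Char :=
  (PySem.List.pyRange 0 n 1).map (fun j => PySem.List.pyGetD (PySem.List.pyGetD boardL j []) i ' ')

def calc_quality (board : List String) : Int :=
  let boardL := board.map String.toList
  let n : Int := (board.length : Int)
  let q := pvCountCharA (pvRowA boardL n 0)
  -- for i in range(1, n): early 'return -1' on mismatch, modelled by an Option accumulator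
  let r1 : Option Int := (PySem.List.pyRange 1 n 1).foldl
    (fun acc i => match acc with
      | some v => some v
      | none => if q ≠ pvCountCharA (pvRowA boardL n i) then some (-1) else none) none
  match r1 with
  | some v => v
  | none =>
    -- for i in range(n): the column loop
    let r2 : Option Int := (PySem.List.pyRange 0 n 1).foldl
      (fun acc i => match acc with
        | some v => some v
        | none => if q ≠ pvCountCharA (pvColA boardL n i) then some (-1) else none) none
    match r2 with
    | some v => v
    | none => q

-- ===== PORT B =====
-- _distinct(chars): total/prev scan over sorted(chars), counting non-'.' predecessor changes
def pvDistinctB (s : List Char) : Int :=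
  ((PySem.List.sorted s (fun x => x) false).foldl
    (fun (st : Int × Option Char) c =>
      (if c ≠ '.' ∧ some c ≠ st.2 then st.1 + 1 else st.1, some c)) (0, none)).1

def calc_quality_alt (board : List String) : Int :=
  let boardL := board.map String.toList
  let n : Int := (board.length : Int)
  if n = 0 then 0
  else
    let q := pvDistinctB (pvRowA boardL n 0)
    if (PySem.List.pyRange 0 n 1).all (fun i =>
        pvDistinctB (pvRowA boardL n i) == q && pvDistinctB (pvColA boardL n i) == q)
    then q else -1

-- ===== PRECONDITION & SPEC =====
-- Pre_ excludes boards having a row shorter than len(board): there A raises IndexError unless a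
-- count mismatch makes it return -1 before reaching the short row (B raises on such boards too,
-- in its comprehensions, but possibly on inputs where A early-exited).
def Pre_calc_quality (board : List String) : Prop :=
  ∀ s ∈ board, board.length ≤ s.toList.length
instance (board : List String) : Decidable (Pre_calc_quality board) := by
  unfold Pre_calc_quality; infer_instance

def pvWitness_calc_quality : List String := ["ab", "b."]

def Spec_calc_quality (board : List String) (out : Int) : Prop := out = calc_quality_alt board
instance (board : List String) (out : Int) : Decidable (Spec_calc_quality board out) := by
  unfold Spec_calc_quality; infer_instance

-- ===== CLAIM (what is proved, stated in full; the proofs are below) =====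
def Claim_equal_calc_quality : Prop := ∀ (board : List String), Dom_calc_quality board → Pre_calc_quality board → Spec_calc_quality board (calc_quality board)

-- ===== LEMMAS AND PROOFS =====

-- the run-compression of a list relative to a previous element: B's scan counts exactly
-- the non-'.' elements of pvKeepN (sorted s)
def pvKeep : Char → List Char → List Char
  | _, [] => []
  | a, b :: l => if b ≠ a then b :: pvKeep b l else pvKeep a l

def pvKeepN : List Char → List Char
  | [] => []
  | c :: l => c :: pvKeep c l

theorem foldl_distinct (l : List Char) (a : Char) (acc : Int) :
    (l.foldl (fun (st : Int × Option Char) c =>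
      (if c ≠ '.' ∧ some c ≠ st.2 then st.1 + 1 else st.1, some c)) (acc, some a)).1
    = acc + ((pvKeep a l).countP (fun c => c ≠ '.') : Int) := by
  induction l generalizing a acc with
  | nil => simp [pvKeep]
  | cons b l ih =>
    simp only [List.foldl_cons]
    rw [ih]
    by_cases hba : b = a
    · subst hba
      simp [pvKeep]
    · by_cases hbd : b = '.'
      · have hda : ¬ ('.' = a) := fun h => hba (hbd.trans h)
        simp [pvKeep, hda, hbd]
      · simp only [pvKeep, if_pos (by simp [hba] : b ≠ a)]
        rw [if_pos (by simp [hba, hbd])]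
        simp [hbd]
        omega

theorem distinct_eq_keepN (s : List Char) :
    pvDistinctB s = ((pvKeepN (PySem.List.sorted s (fun x => x) false)).countP (fun c => c ≠ '.') : Int) := by
  unfold pvDistinctB
  cases h : PySem.List.sorted s (fun x => x) false with
  | nil => simp [pvKeepN]
  | cons c t =>
    simp only [List.foldl_cons]
    by_cases hcd : c = '.'
    · rw [if_neg (by simp [hcd])]
      rw [foldl_distinct]
      simp [pvKeepN, hcd]
    · rw [if_pos (by simp [hcd])]
      rw [foldl_distinct]
      simp [pvKeepN, hcd]
      omega

theorem pvKeep_subset (a : Char) (l : List Char) : ∀ x ∈ pvKeep a l, x ∈ l := by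
  induction l generalizing a with
  | nil => simp [pvKeep]
  | cons b l ih =>
    intro x hx
    unfold pvKeep at hx
    split_ifs at hx with h
    · rcases List.mem_cons.mp hx with h0 | h0
      · simp [h0]
      · exact List.mem_cons_of_mem _ (ih b x h0)
    · exact List.mem_cons_of_mem _ (ih a x hx)

theorem mem_pvKeep (a : Char) (l : List Char) : ∀ x ∈ l, x ≠ a → x ∈ pvKeep a l := by
  induction l generalizing a with
  | nil => simp
  | cons b l ih =>
    intro x hx hxa
    unfold pvKeep
    split_ifs with h
    · rcases List.mem_cons.mp hx with h0 | h0
      · simp [h0]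
      · by_cases hxb : x = b
        · simp [hxb]
        · exact List.mem_cons_of_mem _ (ih b x h0 hxb)
    · rcases List.mem_cons.mp hx with h0 | h0
      · have hab : b = a := by simpa using h
        exact absurd (h0.trans hab) hxa
      · exact ih a x h0 hxa

theorem mem_pvKeepN (l : List Char) : ∀ x, x ∈ pvKeepN l ↔ x ∈ l := by
  intro x
  cases l with
  | nil => simp [pvKeepN]
  | cons c t =>
    simp only [pvKeepN, List.mem_cons]
    constructor
    · rintro (h | h)
      · simp [h]
      · exact Or.inr (pvKeep_subset c t x h)
    · rintro (h | h)
      · exact Or.inl h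
      · by_cases hxc : x = c
        · exact Or.inl hxc
        · exact Or.inr (mem_pvKeep c t x h hxc)

theorem not_mem_pvKeep_self (a : Char) (l : List Char)
    (h : (a :: l).Pairwise (· ≤ ·)) : a ∉ pvKeep a l := by
  induction l generalizing a with
  | nil => simp [pvKeep]
  | cons b t ih =>
    rw [List.pairwise_cons] at h
    obtain ⟨hle, ht⟩ := h
    unfold pvKeep
    split_ifs with hba
    · have hba' : b ≠ a := by simpa using hba
      intro hx
      rcases List.mem_cons.mp hx with h0 | h0
      · exact hba' h0.symm
      · have hat : a ∈ t := pvKeep_subset b t a h0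
        rw [List.pairwise_cons] at ht
        have h1 : b ≤ a := ht.1 a hat
        have h2 : a = b := le_antisymm (hle b (by simp)) h1
        exact hba' h2.symm
    · have hab : b = a := by simpa using hba
      subst hab
      exact ih b (by rw [List.pairwise_cons]; exact ⟨fun x hx => hle x (List.mem_cons_of_mem _ hx), (List.pairwise_cons.mp ht).2⟩)

theorem nodup_pvKeep (l : List Char) (h : l.Pairwise (· ≤ ·)) (a : Char) :
    (pvKeep a l).Nodup := by
  induction l generalizing a with
  | nil => simp [pvKeep]
  | cons b t ih =>
    rw [List.pairwise_cons] at h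
    unfold pvKeep
    split_ifs with hba
    · exact List.Nodup.cons (not_mem_pvKeep_self b t (List.pairwise_cons.mpr h)) (ih h.2 b)
    · exact ih h.2 a

theorem nodup_pvKeepN (l : List Char) (h : l.Pairwise (· ≤ ·)) : (pvKeepN l).Nodup := by
  cases l with
  | nil => simp [pvKeepN]
  | cons c t =>
    exact List.Nodup.cons (not_mem_pvKeep_self c t h)
      (nodup_pvKeep t (List.pairwise_cons.mp h).2 c)

-- len({c for c in chars if c != '.'}): the canonical distinct-count both ports reduce to
def pvCountB (s : List Char) : Int :=
  PySem.Set.len (PySem.Set.ofList (s.filter (fun c => c ≠ '.')))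

-- the two distinct-count computations of A agree with the canonical one
theorem countA_eq_countB (s : List Char) : pvCountCharA s = pvCountB s := by
  unfold pvCountCharA pvCountB PySem.Set.len
  congr 1
  apply List.Perm.length_eq
  apply (List.perm_ext_iff_of_nodup ?_ ?_).mpr
  · intro x
    simp [PySem.Set.diff, PySem.Set.mem_ofList, List.mem_filter, PySem.Set.contains]
  · exact (PySem.Set.nodup_ofList s).filter _
  · exact PySem.Set.nodup_ofList _

-- B's sort-then-scan count also agrees with the canonical one
theorem distinctB_eq_countB (s : List Char) : pvDistinctB s = pvCountB s := by
  rw [distinct_eq_keepN]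
  unfold pvCountB PySem.Set.len
  have hsp := PySem.List.sorted_pairwise (xs := s) (key := fun x => x)
  have hnd := nodup_pvKeepN _ hsp
  rw [List.countP_eq_length_filter]
  congr 1
  apply List.Perm.length_eq
  apply (List.perm_ext_iff_of_nodup ?_ ?_).mpr
  · intro x
    simp only [List.mem_filter, mem_pvKeepN, PySem.List.mem_sorted, PySem.Set.mem_ofList]
  · exact hnd.filter _
  · exact PySem.Set.nodup_ofList _

theorem foldl_keep {α : Type} (L : List α) (g : α → Option Int) (v : Int) :
    L.foldl (fun acc i => match acc with | some w => some w | none => g i) (some v) = some v := by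
  induction L with
  | nil => rfl
  | cons a l ih => simpa [List.foldl] using ih

-- A's early-return loop in closed form
theorem foldl_exit {α : Type} (L : List α) (P : α → Prop) [DecidablePred P] :
    L.foldl (fun acc i => match acc with
      | some w => some w
      | none => if P i then some (-1 : Int) else none) none
    = if ∀ i ∈ L, ¬ P i then none else some (-1) := by
  induction L with
  | nil => simp
  | cons a l ih =>
    by_cases h : P a
    · simp only [List.foldl_cons, if_pos h]
      rw [foldl_keep]
      simp [h]
    · simp only [List.foldl_cons, if_neg h]
      rw [ih]
      simp [h]

theorem map_getD_range {α β : Type} (xs : List α) (d : α) (g : α → β) (L : Nat) (h : L ≤ xs.length) :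
    (List.range L).map (fun k => g (xs.getD k d)) = (xs.take L).map g := by
  apply List.ext_getElem
  · simp [h]
  · intro i h1 h2
    simp at h1
    simp [List.getD_eq_getElem?_getD, List.getElem?_eq_getElem (by omega : i < xs.length)]

-- canonical per-row / per-column counts
def pvRC (board : List String) (row : String) : Int := pvCountB (row.toList.take board.length)
def pvCC (board : List String) (k : Nat) : Int :=
  pvCountB (board.map (fun row => row.toList.getD k ' '))
def pvQ0 (board : List String) : Int := pvRC board (board.headD "")
def pvGoodR (board : List String) : Bool :=
  board.all (fun row => pvRC board row == pvQ0 board)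
def pvGoodC (board : List String) : Bool :=
  (List.range board.length).all (fun k => pvCC board k == pvQ0 board)

-- under Pre_, row i of the comprehensions is the take of the board's row i, and column i the map
theorem rowA_take (r : String) (rest : List String)
    (hpre : Pre_calc_quality (r :: rest)) (k : Nat) (hk : k < (r :: rest).length) :
    pvRowA ((r :: rest).map String.toList) ((r :: rest).length : Int) (k : Int)
      = ((r :: rest).getD k "").toList.take (r :: rest).length := by
  have hgetD : (r :: rest).getD k "" = (r :: rest)[k]'hk := by
    simp [List.getD_eq_getElem?_getD, List.getElem?_eq_getElem hk]
  unfold pvRowA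
  rw [PySem.List.pyRange_zero_natCast, List.map_map]
  have hk' : k < ((r :: rest).map String.toList).length := by simpa using hk
  have h1 : PySem.List.pyGetD ((r :: rest).map String.toList) (k : Int) []
      = ((r :: rest).getD k "").toList := by
    rw [PySem.List.pyGetD_natCast, List.getD_eq_getElem?_getD,
      List.getElem?_eq_getElem hk', hgetD]
    simp only [Option.getD_some, List.getElem_map]
  rw [h1]
  have h2 : ((fun j => PySem.List.pyGetD (((r :: rest).getD k "").toList) j ' ')
        ∘ (fun k : Nat => (k : Int)))
      = fun j : Nat => ((r :: rest).getD k "").toList.getD j ' ' := by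
    funext j
    simp [Function.comp, PySem.List.pyGetD_natCast]
  have hmem : (r :: rest).getD k "" ∈ (r :: rest) := by
    rw [hgetD]; exact List.getElem_mem _
  rw [h2]
  have h4 := map_getD_range ((r :: rest).getD k "").toList ' ' id
    ((r :: rest).length) (hpre _ hmem)
  simp only [id_eq, List.map_id] at h4
  exact h4

theorem colA_map (r : String) (rest : List String) (k : Nat) :
    pvColA ((r :: rest).map String.toList) ((r :: rest).length : Int) (k : Int)
      = (r :: rest).map (fun row => row.toList.getD k ' ') := by
  unfold pvColA
  rw [PySem.List.pyRange_zero_natCast, List.map_map]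
  have h2 : ((fun j => PySem.List.pyGetD
          (PySem.List.pyGetD ((r :: rest).map String.toList) j []) (k : Int) ' ')
        ∘ (fun k : Nat => (k : Int)))
      = fun j : Nat => (((r :: rest).map String.toList).getD j []).getD k ' ' := by
    funext j
    simp [Function.comp, PySem.List.pyGetD_natCast]
  rw [h2]
  have h3 := map_getD_range ((r :: rest).map String.toList) [] (fun rr => rr.getD k ' ')
    ((r :: rest).length) (by simp)
  rw [h3, List.take_of_length_le (by simp), List.map_map]
  rfl

theorem q0_eq (r : String) (rest : List String) (hpre : Pre_calc_quality (r :: rest)) :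
    pvCountB (pvRowA ((r :: rest).map String.toList) ((r :: rest).length : Int) 0)
      = pvQ0 (r :: rest) := by
  rw [show (0 : Int) = ((0 : Nat) : Int) from rfl, rowA_take r rest hpre 0 (by simp)]
  simp [pvQ0, pvRC]

theorem A_closed (board : List String) (hpre : Pre_calc_quality board) :
    calc_quality board =
      if board.length = 0 then 0
      else if pvGoodR board && pvGoodC board then pvQ0 board else -1 := by
  cases board with
  | nil => decide
  | cons r rest =>
    have hgetD : ∀ (k : Nat) (hk : k < (r :: rest).length),
        (r :: rest).getD k "" = (r :: rest)[k]'hk := by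
      intro k hk
      simp [List.getD_eq_getElem?_getD, List.getElem?_eq_getElem hk]
    have hq : pvCountCharA (pvRowA ((r :: rest).map String.toList) ((r :: rest).length : Int) 0)
        = pvQ0 (r :: rest) := by
      rw [countA_eq_countB]; exact q0_eq r rest hpre
    unfold calc_quality
    simp only []
    rw [hq]
    rw [foldl_exit _ (fun i => pvQ0 (r :: rest) ≠ pvCountCharA
        (pvRowA ((r :: rest).map String.toList) ((r :: rest).length : Int) i))]
    rw [foldl_exit _ (fun i => pvQ0 (r :: rest) ≠ pvCountCharA
        (pvColA ((r :: rest).map String.toList) ((r :: rest).length : Int) i))]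
    have hc1 : (∀ i ∈ PySem.List.pyRange 1 ((r :: rest).length : Int) 1,
          ¬ pvQ0 (r :: rest) ≠ pvCountCharA
            (pvRowA ((r :: rest).map String.toList) ((r :: rest).length : Int) i))
        ↔ pvGoodR (r :: rest) = true := by
      constructor
      · intro h
        simp only [pvGoodR, List.all_eq_true, beq_iff_eq]
        intro row hrow'
        obtain ⟨k, hk, rfl⟩ := List.mem_iff_getElem.mp hrow'
        by_cases hk0 : k = 0
        · subst hk0; simp [pvQ0, pvRC]
        · have h1 : ((k : Int)) ∈ PySem.List.pyRange 1 ((r :: rest).length : Int) 1 := by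
            rw [PySem.List.mem_pyRange_one]
            constructor
            · omega
            · exact_mod_cast hk
          have := h _ h1
          rw [not_not] at this
          rw [countA_eq_countB, rowA_take r rest hpre k hk, hgetD k hk] at this
          simp only [pvRC]
          exact this.symm
      · intro h i hi
        rw [PySem.List.mem_pyRange_one] at hi
        simp only [pvGoodR, List.all_eq_true, beq_iff_eq] at h
        rw [not_not]
        have hk : i = ((i.toNat : Nat) : Int) := by omega
        have hki : i.toNat < (r :: rest).length := by omega
        rw [hk, countA_eq_countB, rowA_take r rest hpre i.toNat hki, hgetD _ hki]
        have := h _ (List.getElem_mem hki)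
        simp only [pvRC] at this
        exact this.symm
    have hc2 : (∀ i ∈ PySem.List.pyRange 0 ((r :: rest).length : Int) 1,
          ¬ pvQ0 (r :: rest) ≠ pvCountCharA
            (pvColA ((r :: rest).map String.toList) ((r :: rest).length : Int) i))
        ↔ pvGoodC (r :: rest) = true := by
      constructor
      · intro h
        simp only [pvGoodC, List.all_eq_true, beq_iff_eq]
        intro k hk
        rw [List.mem_range] at hk
        have h1 : ((k : Int)) ∈ PySem.List.pyRange 0 ((r :: rest).length : Int) 1 := by
          rw [PySem.List.mem_pyRange_one]
          constructor
          · omega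
          · exact_mod_cast hk
        have := h _ h1
        rw [not_not, countA_eq_countB, colA_map r rest k] at this
        simp only [pvCC]
        exact this.symm
      · intro h i hi
        rw [PySem.List.mem_pyRange_one] at hi
        simp only [pvGoodC, List.all_eq_true, beq_iff_eq] at h
        rw [not_not]
        have hk : i = ((i.toNat : Nat) : Int) := by omega
        have hki : i.toNat < (r :: rest).length := by omega
        rw [hk, countA_eq_countB, colA_map r rest i.toNat]
        have := h _ (List.mem_range.mpr hki)
        simp only [pvCC] at this
        exact this.symm
    by_cases g1 : pvGoodR (r :: rest) = true
    · rw [if_pos (hc1.mpr g1)]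
      by_cases g2 : pvGoodC (r :: rest) = true
      · rw [if_pos (hc2.mpr g2)]
        simp [g1, g2]
      · rw [if_neg (fun hc => g2 (hc2.mp hc))]
        simp [g2]
    · rw [if_neg (fun hc => g1 (hc1.mp hc))]
      simp [g1]

theorem B_closed (board : List String) (hpre : Pre_calc_quality board) :
    calc_quality_alt board =
      if board.length = 0 then 0
      else if pvGoodR board && pvGoodC board then pvQ0 board else -1 := by
  cases board with
  | nil => decide
  | cons r rest =>
    have hgetD : ∀ (k : Nat) (hk : k < (r :: rest).length),
        (r :: rest).getD k "" = (r :: rest)[k]'hk := by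
      intro k hk
      simp [List.getD_eq_getElem?_getD, List.getElem?_eq_getElem hk]
    have hq : pvDistinctB (pvRowA ((r :: rest).map String.toList) ((r :: rest).length : Int) 0)
        = pvQ0 (r :: rest) := by
      rw [distinctB_eq_countB]; exact q0_eq r rest hpre
    unfold calc_quality_alt
    simp only []
    rw [if_neg (by intro h; rw [List.length_cons] at h; omega : ¬ (((r :: rest).length : Int) = 0))]
    rw [hq]
    have hcond : (PySem.List.pyRange 0 ((r :: rest).length : Int) 1).all (fun i =>
          pvDistinctB (pvRowA ((r :: rest).map String.toList) ((r :: rest).length : Int) i)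
            == pvQ0 (r :: rest)
          && pvDistinctB (pvColA ((r :: rest).map String.toList) ((r :: rest).length : Int) i)
            == pvQ0 (r :: rest))
        = (pvGoodR (r :: rest) && pvGoodC (r :: rest)) := by
      rw [Bool.eq_iff_iff]
      rw [List.all_eq_true, Bool.and_eq_true]
      constructor
      · intro hall
        constructor
        · simp only [pvGoodR, List.all_eq_true, beq_iff_eq]
          intro row hrow'
          obtain ⟨k, hk, rfl⟩ := List.mem_iff_getElem.mp hrow'
          have h1 : ((k : Int)) ∈ PySem.List.pyRange 0 ((r :: rest).length : Int) 1 := by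
            rw [PySem.List.mem_pyRange_one]
            exact ⟨by omega, by exact_mod_cast hk⟩
          have := hall _ h1
          rw [Bool.and_eq_true, beq_iff_eq, beq_iff_eq] at this
          have hrc := this.1
          rw [distinctB_eq_countB, rowA_take r rest hpre k hk, hgetD k hk] at hrc
          simpa [pvRC] using hrc
        · simp only [pvGoodC, List.all_eq_true, beq_iff_eq]
          intro k hk
          rw [List.mem_range] at hk
          have h1 : ((k : Int)) ∈ PySem.List.pyRange 0 ((r :: rest).length : Int) 1 := by
            rw [PySem.List.mem_pyRange_one]
            exact ⟨by omega, by exact_mod_cast hk⟩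
          have := hall _ h1
          rw [Bool.and_eq_true, beq_iff_eq, beq_iff_eq] at this
          have hcc := this.2
          rw [distinctB_eq_countB, colA_map r rest k] at hcc
          simpa [pvCC] using hcc
      · rintro ⟨hgr, hgc⟩ i hi
        rw [PySem.List.mem_pyRange_one] at hi
        have hk : i = ((i.toNat : Nat) : Int) := by omega
        have hki : i.toNat < (r :: rest).length := by omega
        simp only [pvGoodR, List.all_eq_true, beq_iff_eq] at hgr
        simp only [pvGoodC, List.all_eq_true, beq_iff_eq] at hgc
        rw [Bool.and_eq_true, beq_iff_eq, beq_iff_eq]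
        constructor
        · rw [hk, distinctB_eq_countB, rowA_take r rest hpre i.toNat hki, hgetD _ hki]
          exact hgr _ (List.getElem_mem hki)
        · rw [hk, distinctB_eq_countB, colA_map r rest i.toNat]
          exact hgc _ (List.mem_range.mpr hki)
    rw [hcond]
    rw [if_neg (by simp : ¬ ((r :: rest).length = 0))]

-- ===== VERDICT (by name: the statement is the Claim_ definition above) =====
theorem calc_quality_spec : Claim_equal_calc_quality := by
  intro board _ hpre
  unfold Spec_calc_quality
  rw [A_closed board hpre, B_closed board hpre]
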